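-- pv_equiv track=rewrite | github.com/pherateriw/BayesianNetworks | bayesnets/hill_climb.py | countInstances
-- ===== SOURCE A (Python) =====
-- def countInstances(data, pattern, datalen):
--     count = 0
--     for k in data:
--         match = True
--         for i in range(datalen):
--             if pattern[i] is not None and pattern[i] != k[i]:
--                 match = False
--                 break
--         if match is True:
--             count += 1
--     return count
-- ===== SOURCE B (Python) =====
-- def countInstances(data, pattern, datalen):
--     cols = [i for i in range(datalen) if pattern[i] is not None]
--     counts = {}
--     for k in data:
--         key = tuple(k[i] for i in cols)
--         counts[key] = counts.get(key, 0) + 1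
--     return counts.get(tuple(pattern[i] for i in cols), 0)
-- ===== Notes on version B (the rewrite author's own statement) =====
-- stated objective: alternative
-- what changed: B groups the rows into a dictionary keyed by each row's projection onto the constrained columns and answers with a single lookup of the pattern's projection, instead of A's per-row flag/break pattern-matching loop.
-- outside the precondition, e.g. on countInstances([], [], 1): A returns 0, B raises IndexError; on countInstances([[None]], [5, 7], 2): A returns 0, B raises IndexError
import Mathlib
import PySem

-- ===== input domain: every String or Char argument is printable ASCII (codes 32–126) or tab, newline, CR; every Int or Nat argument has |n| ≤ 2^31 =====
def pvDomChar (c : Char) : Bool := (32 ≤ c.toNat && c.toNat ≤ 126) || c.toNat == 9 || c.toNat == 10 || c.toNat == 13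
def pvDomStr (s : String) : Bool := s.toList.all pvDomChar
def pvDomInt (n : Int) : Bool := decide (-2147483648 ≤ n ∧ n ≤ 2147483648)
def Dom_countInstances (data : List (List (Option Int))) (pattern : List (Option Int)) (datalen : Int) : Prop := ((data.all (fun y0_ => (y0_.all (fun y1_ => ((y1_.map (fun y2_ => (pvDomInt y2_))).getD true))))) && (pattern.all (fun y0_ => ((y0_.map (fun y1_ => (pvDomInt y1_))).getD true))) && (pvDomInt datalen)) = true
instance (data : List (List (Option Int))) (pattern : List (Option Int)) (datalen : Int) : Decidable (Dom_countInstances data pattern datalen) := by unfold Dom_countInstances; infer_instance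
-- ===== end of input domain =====

-- B groups the rows into a dict keyed by each row's projection onto the constrained columns and
-- answers with one lookup of the pattern's projection; same values as A wherever datalen fits the
-- pattern and every row (objective: alternative).

-- ===== PORT A =====
-- inner 'for i in range(datalen): if pattern[i] is not None and pattern[i] != k[i]: match = False; break'
-- (a 'none' from pyGet? is Python's IndexError; those inputs are outside Pre_, the value false is arbitrary)
def pvMatchA (pattern k : List (Option Int)) : List Int → Bool
  | [] => true
  | i :: rest =>
    match PySem.List.pyGet? pattern i with
    | none => false              -- IndexError (excluded by Pre_)
    | some none => pvMatchA pattern k rest        -- pattern[i] is None: condition false, continue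
    | some (some v) =>
      match PySem.List.pyGet? k i with
      | none => false            -- IndexError (excluded by Pre_)
      | some kv => if (some v : Option Int) ≠ kv then false else pvMatchA pattern k rest

def countInstances (data : List (List (Option Int))) (pattern : List (Option Int)) (datalen : Int) : Int :=
  data.foldl (fun count k =>
    if pvMatchA pattern k (PySem.List.pyRange 0 datalen 1) then count + 1 else count) 0

-- ===== PORT B =====
-- cols = [i for i in range(datalen) if pattern[i] is not None]
-- (out-of-range pyGet? yields the default 'none'; outside Pre_ Python B raises there)
def pvCols (pattern : List (Option Int)) (datalen : Int) : List Int :=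
  (PySem.List.pyRange 0 datalen 1).filter (fun i => ((PySem.List.pyGet? pattern i).getD none).isSome)

-- tuple(xs[i] for i in cols)
def pvProj (cols : List Int) (xs : List (Option Int)) : List (Option Int) :=
  cols.map (fun i => (PySem.List.pyGet? xs i).getD none)

-- counts = {}; for k in data: key = tuple(...); counts[key] = counts.get(key, 0) + 1
-- return counts.get(tuple(pattern[i] for i in cols), 0)
def countInstances_alt (data : List (List (Option Int))) (pattern : List (Option Int)) (datalen : Int) : Int :=
  let cols := pvCols pattern datalen
  let counts := data.foldl
    (fun d k => d.insert (pvProj cols k) (d.getD (pvProj cols k) 0 + 1))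
    (PySem.Dict.empty : PySem.Dict (List (Option Int)) Int)
  counts.getD (pvProj cols pattern) 0

-- ===== PRECONDITION & SPEC =====
-- Pre_ excludes inputs where datalen exceeds the pattern or some row length: there A's IndexError
-- depends on which row first reaches an out-of-range index (on part of those inputs A still returns,
-- e.g. data=[] with datalen>len(pattern), where B's upfront column scan raises instead).
def Pre_countInstances (data : List (List (Option Int))) (pattern : List (Option Int)) (datalen : Int) : Prop :=
  datalen ≤ (pattern.length : Int) ∧ ∀ k ∈ data, datalen ≤ (k.length : Int)
instance (data : List (List (Option Int))) (pattern : List (Option Int)) (datalen : Int) : Decidable (Pre_countInstances data pattern datalen) := by unfold Pre_countInstances; infer_instance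

def pvWitness_countInstances : List (List (Option Int)) × List (Option Int) × Int :=
  ([[some 1, some 2], [some 1, none], [some 3, some 2]], [some 1, none], 2)

def Spec_countInstances (data : List (List (Option Int))) (pattern : List (Option Int)) (datalen : Int) (out : Int) : Prop := out = countInstances_alt data pattern datalen
instance (data : List (List (Option Int))) (pattern : List (Option Int)) (datalen : Int) (out : Int) : Decidable (Spec_countInstances data pattern datalen out) := by unfold Spec_countInstances; infer_instance

-- ===== CLAIM (what is proved, stated in full; the proofs are below) =====
def Claim_equal_countInstances : Prop := ∀ (data : List (List (Option Int))) (pattern : List (Option Int)) (datalen : Int), Dom_countInstances data pattern datalen → Pre_countInstances data pattern datalen → Spec_countInstances data pattern datalen (countInstances data pattern datalen)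

-- ===== LEMMAS AND PROOFS =====

-- per-row: A's break-loop over an index list equals 'all equal' over the pattern-constrained indices,
-- provided every index is in range for both pattern and row.
theorem pvMatchA_eq_all (pattern k : List (Option Int)) (l : List Int)
    (h : ∀ i ∈ l, 0 ≤ i ∧ i < (pattern.length : Int) ∧ i < (k.length : Int)) :
    pvMatchA pattern k l =
      (l.filter (fun i => ((PySem.List.pyGet? pattern i).getD none).isSome)).all
        (fun i => (PySem.List.pyGet? k i).getD none == (PySem.List.pyGet? pattern i).getD none) := by
  induction l with
  | nil => simp [pvMatchA]
  | cons i rest ih =>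
    obtain ⟨h0, hp, hk⟩ := h i (by simp)
    have hps : PySem.List.pyGet? pattern i = some pattern[i.toNat] :=
      PySem.List.pyGet?_eq_some_getElem pattern h0 hp
    have hks : PySem.List.pyGet? k i = some k[i.toNat] :=
      PySem.List.pyGet?_eq_some_getElem k h0 hk
    have ih' := ih (fun j hj => h j (by simp [hj]))
    cases hpv : pattern[i.toNat] with
    | none => simp [pvMatchA, hps, hks, hpv, ih']
    | some v =>
      by_cases he : (some v : Option Int) = k[i.toNat]
      · have hkv : k[i.toNat] = some v := he.symm
        simp [pvMatchA, hps, hks, hpv, hkv, ih']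
      · have h1 : (decide (some v = k[i.toNat])) = false := by
          simpa using he
        have h2 : (k[i.toNat] == (some v : Option Int)) = false := by
          simpa [beq_iff_eq] using fun hh => he hh.symm
        simp [pvMatchA, hps, hks, hpv, ih', h1, h2]

-- 'all columns equal' is the same as 'the two projections are equal as lists'
theorem all_eq_proj (cols : List Int) (k pattern : List (Option Int)) :
    (cols.all (fun i => (PySem.List.pyGet? k i).getD none == (PySem.List.pyGet? pattern i).getD none))
      = (pvProj cols k == pvProj cols pattern) := by
  induction cols with
  | nil => simp [pvProj]
  | cons i rest ih =>
    simp only [List.all_cons, pvProj, List.map_cons, List.cons_beq_cons, ih, pvProj]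

-- a conditional-increment fold counts the satisfying elements
theorem foldl_if_count {α : Type} (p : α → Bool) (l : List α) (acc : Int) :
    l.foldl (fun c k => if p k then c + 1 else c) acc = acc + (l.countP p : Int) := by
  induction l generalizing acc with
  | nil => simp
  | cons x xs ih =>
    by_cases hx : p x <;> simp [List.countP_cons, hx, ih] <;> push_cast <;> ring

-- ===== VERDICT (by name: the statement is the Claim_ definition above) =====
theorem countInstances_spec : Claim_equal_countInstances := by
  intro data pattern datalen _ hpre
  unfold Spec_countInstances countInstances countInstances_alt
  -- B's side: the counter lookup is a count of equal projections
  have hB : (data.foldl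
      (fun d k => d.insert (pvProj (pvCols pattern datalen) k)
        (d.getD (pvProj (pvCols pattern datalen) k) 0 + 1))
      (PySem.Dict.empty : PySem.Dict (List (Option Int)) Int)).getD
        (pvProj (pvCols pattern datalen) pattern) 0
      = ((data.map (pvProj (pvCols pattern datalen))).count
          (pvProj (pvCols pattern datalen) pattern) : Int) := by
    have hfold : (data.map (pvProj (pvCols pattern datalen))).foldl
        (fun d x => d.insert x (d.getD x 0 + 1))
        (PySem.Dict.empty : PySem.Dict (List (Option Int)) Int)
        = data.foldl
          (fun d k => d.insert (pvProj (pvCols pattern datalen) k)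
            (d.getD (pvProj (pvCols pattern datalen) k) 0 + 1))
          (PySem.Dict.empty : PySem.Dict (List (Option Int)) Int) := by
      rw [List.foldl_map]
    rw [← hfold, PySem.Dict.getD_foldl_insert_add_one]
    simp
  rw [hB, List.count_eq_countP, List.countP_map]
  -- A's side: each row matches iff its projection equals the pattern's
  have hA : ∀ k ∈ data,
      pvMatchA pattern k (PySem.List.pyRange 0 datalen 1)
        = (pvProj (pvCols pattern datalen) k == pvProj (pvCols pattern datalen) pattern) := by
    intro k hk
    rw [pvMatchA_eq_all pattern k _ (by
      intro i hi
      rw [PySem.List.mem_pyRange_one] at hi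
      exact ⟨hi.1, lt_of_lt_of_le hi.2 hpre.1, lt_of_lt_of_le hi.2 (hpre.2 k hk)⟩)]
    exact all_eq_proj (pvCols pattern datalen) k pattern
  have hcongr := PySem.List.foldl_congr_mem
      (l := data) (init := (0 : Int))
      (f := fun count k => if pvMatchA pattern k (PySem.List.pyRange 0 datalen 1) then count + 1 else count)
      (g := fun c k =>
        if (pvProj (pvCols pattern datalen) k == pvProj (pvCols pattern datalen) pattern) then c + 1 else c)
      (by intro acc k hk; simp only [hA k hk])
  rw [hcongr, foldl_if_count]
  simp [Function.comp_def]
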